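-- pv_equiv track=rewrite | github.com/bpandola/advent-of-code | 2023/day_02.py | validate_games
-- ===== SOURCE A (Python) =====
-- def validate_games(games, constraints):
--     valid_game_ids = []
--     for i, game in enumerate(games, start=1):
--         game_valid = True
--         for draw in game:
--             for color, num in constraints.items():
--                 if draw.get(color, 0) > num:
--                     game_valid = False
--                     break
--         if game_valid:
--             valid_game_ids.append(i)
--     return sum(valid_game_ids)
-- ===== SOURCE B (Python) =====
-- def validate_games(games, constraints):
--     # Complement + closed form: instead of summing valid ids, collect the set of
--     # game indices that violate at least one constraint (constraint-outer loop),
--     # then subtract their sum from the Gauss total 1+2+...+n = n(n+1)//2.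
--     n = len(games)
--     violating = set()
--     for color, num in constraints.items():
--         for i, game in enumerate(games, start=1):
--             if any(draw.get(color, 0) > num for draw in game):
--                 violating.add(i)
--     return n * (n + 1) // 2 - sum(violating)
-- ===== Notes on version B (the rewrite author's own statement) =====
-- stated objective: alternative
-- what changed: Inverts the problem: instead of scanning each game's draws against all constraints and summing valid ids, B loops constraints in the outer loop, collects the set of game indices violating any single constraint, and returns the Gauss closed form n(n+1)//2 minus the sum of that set.
import Mathlib
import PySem

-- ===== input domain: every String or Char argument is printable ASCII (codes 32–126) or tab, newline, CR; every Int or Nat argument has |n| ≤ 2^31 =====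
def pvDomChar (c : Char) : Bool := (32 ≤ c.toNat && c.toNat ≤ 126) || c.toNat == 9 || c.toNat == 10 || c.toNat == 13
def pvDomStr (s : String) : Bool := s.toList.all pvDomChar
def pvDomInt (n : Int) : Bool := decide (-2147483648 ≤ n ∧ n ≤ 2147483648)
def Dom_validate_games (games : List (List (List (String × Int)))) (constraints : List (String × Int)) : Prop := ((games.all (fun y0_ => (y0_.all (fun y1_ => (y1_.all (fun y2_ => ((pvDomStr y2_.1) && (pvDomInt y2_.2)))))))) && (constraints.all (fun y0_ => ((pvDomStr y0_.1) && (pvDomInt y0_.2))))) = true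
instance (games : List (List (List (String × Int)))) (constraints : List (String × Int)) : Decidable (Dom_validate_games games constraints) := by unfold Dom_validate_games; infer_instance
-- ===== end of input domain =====

-- B inverts A's approach: constraint-outer loop collecting the SET of violating game indices,
-- result = Gauss closed form n(n+1)//2 minus that set's sum (objective: alternative).


-- ===== PORT A =====
-- draw.get(color, 0): first-match lookup in the draw dict
def pvDget (draw : List (String × Int)) (color : String) : Int :=
  (PySem.Dict.mk draw).getD color 0

def validate_games (games : List (List (List (String × Int)))) (constraints : List (String × Int)) : Int :=
  ((PySem.List.enumerate games 1).foldl (fun valid_game_ids ig =>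
      -- inner 'for color, num in constraints.items(): if draw.get(color,0) > num: flag; break'
      -- = scan the constraints until one fails
      let game_valid := ig.2.foldl (fun gv draw =>
        if constraints.any (fun cn => decide (cn.2 < pvDget draw cn.1)) then false else gv) true
      if game_valid then valid_game_ids ++ [ig.1] else valid_game_ids) ([] : List Int)).sum

-- ===== PORT B =====
-- constraint-outer loop: 'violating' is a Python set of game indices; summing it is safe
-- (sum of a set of ints does not depend on iteration order)
def validate_games_alt (games : List (List (List (String × Int)))) (constraints : List (String × Int)) : Int :=
  let n : Int := games.length
  let violating : PySem.Set Int :=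
    constraints.foldl (fun s cn =>
      (PySem.List.enumerate games 1).foldl (fun s ig =>
        if ig.2.any (fun draw => decide (cn.2 < pvDget draw cn.1)) then PySem.Set.add s ig.1 else s) s)
      PySem.Set.empty
  PySem.Int.floordiv (n * (n + 1)) 2 - violating.sum

-- ===== PRECONDITION & SPEC =====
def Spec_validate_games (games : List (List (List (String × Int)))) (constraints : List (String × Int)) (out : Int) : Prop := out = validate_games_alt games constraints
instance (games : List (List (List (String × Int)))) (constraints : List (String × Int)) (out : Int) : Decidable (Spec_validate_games games constraints out) := by unfold Spec_validate_games; infer_instance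

-- ===== CLAIM (what is proved, stated in full; the proofs are below) =====
def Claim_equal_validate_games : Prop := ∀ (games : List (List (List (String × Int)))) (constraints : List (String × Int)), Dom_validate_games games constraints → Spec_validate_games games constraints (validate_games games constraints)

-- ===== LEMMAS AND PROOFS =====

-- A's flag loop: once false, stays false
theorem pv_flag_false (bad : List (String × Int) → Bool) (game : List (List (String × Int))) :
    game.foldl (fun gv draw => if bad draw then false else gv) false = false := by
  induction game with
  | nil => rfl
  | cons d ds ih =>
    simp only [List.foldl_cons, ite_self]
    exact ih

-- A's flag loop computes "no bad draw"
theorem pv_flag_eq_not_any (bad : List (String × Int) → Bool) (game : List (List (String × Int))) :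
    game.foldl (fun gv draw => if bad draw then false else gv) true = !game.any bad := by
  induction game with
  | nil => rfl
  | cons d ds ih =>
    by_cases h : bad d = true
    · simp only [List.foldl_cons]
      rw [if_pos h, pv_flag_false]
      simp [h]
    · simp only [List.foldl_cons, if_neg h, ih, List.any_cons]
      simp only [Bool.not_eq_true] at h
      simp [h]

-- membership in B's inner guarded-add fold
theorem pv_mem_inner_fold {α : Type} (q : Int × α → Bool)
    (l : List (Int × α)) (s : PySem.Set Int) (y : Int) :
    y ∈ l.foldl (fun s ig => if q ig then PySem.Set.add s ig.1 else s) s ↔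
      y ∈ s ∨ ∃ ig ∈ l, q ig ∧ y = ig.1 := by
  induction l generalizing s with
  | nil => simp
  | cons x xs ih =>
    simp only [List.foldl_cons, ih, List.mem_cons]
    by_cases h : q x = true
    · rw [if_pos h, PySem.Set.mem_add]
      constructor
      · rintro (⟨hs | rfl⟩ | ⟨ig, hig, hq, rfl⟩)
        · exact Or.inl hs
        · exact Or.inr ⟨x, Or.inl rfl, h, rfl⟩
        · exact Or.inr ⟨ig, Or.inr hig, hq, rfl⟩
      · rintro (hs | ⟨ig, (rfl | hig), hq, rfl⟩)
        · exact Or.inl (Or.inl hs)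
        · exact Or.inl (Or.inr rfl)
        · exact Or.inr ⟨ig, hig, hq, rfl⟩
    · rw [if_neg h]
      constructor
      · rintro (hs | ⟨ig, hig, hq, rfl⟩)
        · exact Or.inl hs
        · exact Or.inr ⟨ig, Or.inr hig, hq, rfl⟩
      · rintro (hs | ⟨ig, (rfl | hig), hq, rfl⟩)
        · exact Or.inl hs
        · exact absurd hq h
        · exact Or.inr ⟨ig, hig, hq, rfl⟩

-- B's inner fold preserves Nodup
theorem pv_nodup_inner_fold {α : Type} (q : Int × α → Bool)
    (l : List (Int × α)) (s : PySem.Set Int) (hs : s.Nodup) :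
    (l.foldl (fun s ig => if q ig then PySem.Set.add s ig.1 else s) s).Nodup := by
  induction l generalizing s with
  | nil => exact hs
  | cons x xs ih =>
    simp only [List.foldl_cons]
    by_cases h : q x = true
    · rw [if_pos h]; exact ih _ (PySem.Set.nodup_add s x.1 hs)
    · rw [if_neg h]; exact ih _ hs

-- membership in B's full violating set
theorem pv_mem_violating (games : List (List (List (String × Int))))
    (cs : List (String × Int)) (s : PySem.Set Int) (y : Int) :
    y ∈ cs.foldl (fun s cn =>
        (PySem.List.enumerate games 1).foldl (fun s ig =>
          if ig.2.any (fun draw => decide (cn.2 < pvDget draw cn.1)) then PySem.Set.add s ig.1 else s) s) s ↔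
      y ∈ s ∨ ∃ cn ∈ cs, ∃ ig ∈ PySem.List.enumerate games 1,
        (ig.2.any (fun draw => decide (cn.2 < pvDget draw cn.1)) = true) ∧ y = ig.1 := by
  induction cs generalizing s with
  | nil => simp
  | cons c cs ih =>
    simp only [List.foldl_cons, ih, pv_mem_inner_fold, List.mem_cons]
    constructor
    · rintro (⟨h | h⟩ | h)
      · exact Or.inl h
      · obtain ⟨ig, hig, hq, rfl⟩ := h
        exact Or.inr ⟨c, Or.inl rfl, ig, hig, hq, rfl⟩
      · obtain ⟨cn, hcn, rest⟩ := h
        exact Or.inr ⟨cn, Or.inr hcn, rest⟩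
    · rintro (h | ⟨cn, (rfl | hcn), rest⟩)
      · exact Or.inl (Or.inl h)
      · exact Or.inl (Or.inr rest)
      · exact Or.inr ⟨cn, hcn, rest⟩

-- B's full violating set is Nodup
theorem pv_nodup_violating (games : List (List (List (String × Int))))
    (cs : List (String × Int)) (s : PySem.Set Int) (hs : s.Nodup) :
    (cs.foldl (fun s cn =>
        (PySem.List.enumerate games 1).foldl (fun s ig =>
          if ig.2.any (fun draw => decide (cn.2 < pvDget draw cn.1)) then PySem.Set.add s ig.1 else s) s) s).Nodup := by
  induction cs generalizing s with
  | nil => exact hs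
  | cons c cs ih =>
    exact ih _ (pv_nodup_inner_fold _ _ _ hs)

-- Gauss: twice the sum of 1..n
theorem pv_gauss (n : Nat) :
    ((List.range n).map (fun k : Nat => (1 : Int) + (k : Int))).sum * 2 = (n : Int) * ((n : Int) + 1) := by
  induction n with
  | zero => norm_num
  | succ m ih =>
    rw [List.range_succ, List.map_append, List.sum_append]
    simp only [List.map_cons, List.map_nil, List.sum_cons, List.sum_nil]
    push_cast
    push_cast at ih
    linarith

-- sum over a list splits into the filter and its complement
theorem pv_sum_split {α : Type} (p : Int × α → Bool) (l : List (Int × α)) :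
    ((l.filter p).map (·.1)).sum + ((l.filter (fun x => !p x)).map (·.1)).sum
      = (l.map (·.1)).sum := by
  induction l with
  | nil => rfl
  | cons x xs ih =>
    by_cases h : p x = true
    · simp [h]; linarith
    · simp [h]; linarith

-- ===== VERDICT (by name: the statement is the Claim_ definition above) =====
theorem validate_games_spec : Claim_equal_validate_games := by
  intro games constraints _
  unfold Spec_validate_games validate_games validate_games_alt
  -- the "bad" predicate: game has a draw violating some constraint
  set bad : Int × List (List (String × Int)) → Bool := fun ig =>
    ig.2.any (fun draw => constraints.any (fun cn => decide (cn.2 < pvDget draw cn.1))) with hbad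
  -- A = sum over valid games
  have hA : ((PySem.List.enumerate games 1).foldl (fun valid_game_ids ig =>
      let game_valid := ig.2.foldl (fun gv draw =>
        if constraints.any (fun cn => decide (cn.2 < pvDget draw cn.1)) then false else gv) true
      if game_valid then valid_game_ids ++ [ig.1] else valid_game_ids) ([] : List Int)).sum
      = (((PySem.List.enumerate games 1).filter (fun ig => !bad ig)).map (·.1)).sum := by
    simp only [pv_flag_eq_not_any, hbad]
    rw [PySem.List.foldl_append_if _ (·.1) (PySem.List.enumerate games 1) []]
    simp
  rw [hA]
  -- B's violating invariant set as a list = permutation of the bad indices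
  set viol := constraints.foldl (fun s cn =>
      (PySem.List.enumerate games 1).foldl (fun s ig =>
        if ig.2.any (fun draw => decide (cn.2 < pvDget draw cn.1)) then PySem.Set.add s ig.1 else s) s)
      PySem.Set.empty with hviol
  set badL := ((PySem.List.enumerate games 1).filter bad).map (·.1) with hbadL
  have hbadLpw : badL.Pairwise (· < ·) := by
    rw [hbadL]
    exact List.Pairwise.map _ (fun a b (h : a.1 < b.1) => h)
      ((PySem.List.pairwise_lt_enumerate games 1).filter bad)
  have hperm : List.Perm viol badL := by
    rw [List.perm_ext_iff_of_nodup]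
    · intro y
      rw [hviol, pv_mem_violating]
      simp only [PySem.Set.empty, List.not_mem_nil, false_or, hbadL, List.mem_map,
        List.mem_filter]
      constructor
      · rintro ⟨cn, hcn, ig, hig, hv, rfl⟩
        refine ⟨ig, ⟨hig, ?_⟩, rfl⟩
        rw [hbad]
        simp only [List.any_eq_true] at hv ⊢
        obtain ⟨d, hd, hvd⟩ := hv
        exact ⟨d, hd, cn, hcn, hvd⟩
      · rintro ⟨ig, ⟨hig, hb⟩, rfl⟩
        rw [hbad] at hb
        simp only [List.any_eq_true] at hb
        obtain ⟨d, hd, cn, hcn, hv⟩ := hb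
        exact ⟨cn, hcn, ig, hig, List.any_eq_true.mpr ⟨d, hd, hv⟩, rfl⟩
    · exact pv_nodup_violating _ _ _ List.nodup_nil
    · exact hbadLpw.imp (fun h => ne_of_lt h)
  have hsum : List.sum viol = badL.sum := hperm.sum_eq
  -- the Gauss total
  have htotal : PySem.Int.floordiv ((games.length : Int) * ((games.length : Int) + 1)) 2
      = ((PySem.List.enumerate games 1).map (·.1)).sum := by
    rw [PySem.List.map_fst_enumerate, PySem.List.pyRange_one]
    have h1 : ((1 : Int) + games.length - 1).toNat = games.length := by omega
    rw [h1]
    rw [PySem.Int.floordiv_eq_ediv_of_pos (by norm_num)]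
    rw [← pv_gauss games.length]
    exact Int.mul_ediv_cancel _ (by norm_num)
  simp only [hsum, htotal]
  have hsplit := pv_sum_split bad (PySem.List.enumerate games 1)
  rw [hbadL]
  linarith
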